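-- pv_equiv track=rewrite | github.com/Vingine-Search/audio-analysis | whisper_asr/bounder.py | compare_seconds_with_topics
-- ===== SOURCE A (Python) =====
-- def compare_seconds_with_topics(seconds_list, topic_list):
--     # for each topic in the topic list
--     split_secs = []
--     for tw, ts in zip(topic_list, seconds_list):
--         if tw == 1:
--             split_secs.append(ts)
--     last_sec = 0
--     range_split_secs = []
--     for sec in split_secs:
--         range_split_secs.append((last_sec, sec))
--         last_sec = sec
--     return range_split_secs
-- ===== SOURCE B (Python) =====
-- def compare_seconds_with_topics(seconds_list, topic_list):
--     # reverse sweep: each flagged second becomes the END of a range whose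
--     # start is the next flagged second seen (later in the reverse walk), or 0
--     out = []
--     nxt = None
--     for tw, ts in reversed(list(zip(topic_list, seconds_list))):
--         if tw == 1:
--             if nxt is not None:
--                 out.append((ts, nxt))
--             nxt = ts
--     if nxt is not None:
--         out.append((0, nxt))
--     out.reverse()
--     return out
-- ===== Notes on version B (the rewrite author's own statement) =====
-- stated objective: alternative
-- what changed: Traverses the zipped lists in reverse and builds the ranges back-to-front: each flagged second is emitted as a range END paired with the flagged second met next in the reverse sweep (0 closes the first range), then the output is reversed; no intermediate split_secs list and no last_sec predecessor accumulator.
import Mathlib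
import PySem

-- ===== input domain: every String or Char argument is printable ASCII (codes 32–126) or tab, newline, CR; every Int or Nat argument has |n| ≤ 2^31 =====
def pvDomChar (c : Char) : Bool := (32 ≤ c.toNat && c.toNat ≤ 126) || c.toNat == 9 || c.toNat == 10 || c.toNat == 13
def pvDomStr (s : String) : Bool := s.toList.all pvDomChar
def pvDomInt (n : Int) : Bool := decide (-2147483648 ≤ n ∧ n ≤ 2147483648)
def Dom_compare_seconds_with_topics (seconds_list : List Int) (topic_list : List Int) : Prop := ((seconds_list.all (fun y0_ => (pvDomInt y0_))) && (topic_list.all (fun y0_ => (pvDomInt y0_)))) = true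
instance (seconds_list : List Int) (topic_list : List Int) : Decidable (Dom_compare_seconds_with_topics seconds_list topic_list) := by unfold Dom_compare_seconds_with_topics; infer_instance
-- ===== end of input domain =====

-- B replaces A's two forward passes (filter into split_secs, then a last_sec
-- predecessor accumulator) by a single REVERSE sweep building the ranges
-- back-to-front, followed by a reverse of the output; same cost, return value only.

-- ===== PORT A =====
-- A's second loop: running last_sec accumulator, appending (last_sec, sec)
def pvLoopA (last_sec : Int) (split_secs : List Int) : List (Int × Int) :=
  match split_secs with
  | [] => []
  | sec :: rest => (last_sec, sec) :: pvLoopA sec rest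

def compare_seconds_with_topics (seconds_list : List Int) (topic_list : List Int) : List (Int × Int) :=
  -- first loop: filter seconds whose topic flag is 1, via foldl append (as in A)
  let split_secs := (topic_list.zip seconds_list).foldl
    (fun acc p => if p.1 == 1 then acc ++ [p.2] else acc) []
  pvLoopA 0 split_secs

-- ===== PORT B =====
-- Source B's loop body: state (out, nxt); on a flagged pair emit (ts, nxt) if nxt set, then nxt := ts
def pvStepB (st : List (Int × Int) × Option Int) (p : Int × Int) : List (Int × Int) × Option Int :=
  if p.1 == 1 then
    match st.2 with
    | some v => (st.1 ++ [(p.2, v)], some p.2)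
    | none => (st.1, some p.2)
  else st

def compare_seconds_with_topics_alt (seconds_list : List Int) (topic_list : List Int) : List (Int × Int) :=
  let st := ((topic_list.zip seconds_list).reverse).foldl pvStepB ([], none)
  let out := match st.2 with
    | some v => st.1 ++ [(0, v)]
    | none => st.1
  out.reverse

-- ===== PRECONDITION & SPEC =====
def Spec_compare_seconds_with_topics (seconds_list : List Int) (topic_list : List Int) (out : List (Int × Int)) : Prop := out = compare_seconds_with_topics_alt seconds_list topic_list
instance (seconds_list : List Int) (topic_list : List Int) (out : List (Int × Int)) : Decidable (Spec_compare_seconds_with_topics seconds_list topic_list out) := by unfold Spec_compare_seconds_with_topics; infer_instance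

-- ===== CLAIM (what is proved, stated in full; the proofs are below) =====
def Claim_equal_compare_seconds_with_topics : Prop := ∀ (seconds_list : List Int) (topic_list : List Int), Dom_compare_seconds_with_topics seconds_list topic_list → Spec_compare_seconds_with_topics seconds_list topic_list (compare_seconds_with_topics seconds_list topic_list)

-- ===== LEMMAS AND PROOFS =====

-- the flag filter as a filterMap, shared by both analyses
def pvFlag (p : Int × Int) : Option Int := if p.1 == 1 then some p.2 else none

-- B's step on a flagged-seconds list (guard removed)
def pvStepB' (st : List (Int × Int) × Option Int) (x : Int) : List (Int × Int) × Option Int :=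
  match st.2 with
  | some v => (st.1 ++ [(x, v)], some x)
  | none => (st.1, some x)

-- A's filter loop (foldl with append) computes the filterMap of the flag
theorem pv_foldl_eq_filterMap (l : List (Int × Int)) (acc : List Int) :
    l.foldl (fun acc p => if p.1 == 1 then acc ++ [p.2] else acc) acc
      = acc ++ l.filterMap pvFlag := by
  induction l generalizing acc with
  | nil => simp
  | cons p rest ih =>
    rw [List.foldl_cons, List.filterMap_cons]
    by_cases h : (p.1 == 1) = true
    · rw [if_pos h, ih, List.append_assoc]; simp [pvFlag, h]
    · rw [if_neg h, ih]; simp [pvFlag, h]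

-- A's accumulator loop computes adjacent pairs: pairing last::s with s
theorem pvLoopA_eq_zip (last : Int) (s : List Int) :
    pvLoopA last s = List.zip (last :: s) s := by
  induction s generalizing last with
  | nil => simp [pvLoopA]
  | cons x xs ih => simp [pvLoopA, List.zip, ih]

-- B's guarded fold over any list acts only on the flagged seconds
theorem pv_foldB_eq_foldB' (m : List (Int × Int)) (st : List (Int × Int) × Option Int) :
    m.foldl pvStepB st = (m.filterMap pvFlag).foldl pvStepB' st := by
  induction m generalizing st with
  | nil => rfl
  | cons p rest ih =>
    rw [List.foldl_cons, List.filterMap_cons]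
    by_cases h : (p.1 == 1) = true
    · simp only [pvFlag, h, if_true, pvStepB]
      rw [List.foldl_cons, ih]; rfl
    · simp only [pvFlag, pvStepB, if_neg h]
      rw [ih]; rfl

-- the reverse sweep over flagged seconds s produces the reversed adjacent pairs
-- of s with its tail, remembering the head of s
theorem pv_foldB'_reverse (s : List Int) :
    (s.reverse).foldl pvStepB' ([], none)
      = ((List.zip s s.tail).reverse, s.head?) := by
  induction s with
  | nil => rfl
  | cons x rest ih =>
    rw [List.reverse_cons, List.foldl_append, ih]
    cases rest with
    | nil => rfl
    | cons y ys => simp [pvStepB', List.zip]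

-- ===== VERDICT (by name: the statement is the Claim_ definition above) =====
theorem compare_seconds_with_topics_spec : Claim_equal_compare_seconds_with_topics := by
  intro seconds_list topic_list _
  unfold Spec_compare_seconds_with_topics compare_seconds_with_topics compare_seconds_with_topics_alt
  rw [pv_foldl_eq_filterMap, List.nil_append, pvLoopA_eq_zip,
      pv_foldB_eq_foldB', List.filterMap_reverse, pv_foldB'_reverse]
  cases List.filterMap pvFlag (topic_list.zip seconds_list) with
  | nil => rfl
  | cons x rest => simp [List.zip]
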